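-- pv_equiv track=rewrite | github.com/cproencaantunes/meu-app-scripts | pages/02_Doentes_anestesiados.py | cluster_rows
-- ===== SOURCE A (Python) =====
-- def cluster_rows(words, gap=6):
--     if not words:
--         return []
--     sw = sorted(words, key=lambda w: w['top'])
--     clusters = [[sw[0]]]
--     for w in sw[1:]:
--         if w['top'] - clusters[-1][-1]['top'] <= gap:
--             clusters[-1].append(w)
--         else:
--             clusters.append([w])
--     return [(int(c[0]['top']), c) for c in clusters]
-- ===== SOURCE B (Python) =====
-- def cluster_rows(words, gap=6):
--     remaining = sorted(words, key=lambda w: w['top'])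
--     out = []
--     while remaining:
--         row = [remaining[0]]
--         k = 1
--         while k < len(remaining) and remaining[k]['top'] - row[-1]['top'] <= gap:
--             row.append(remaining[k])
--             k += 1
--         out.append((int(row[0]['top']), row))
--         remaining = remaining[k:]
--     return out
-- ===== Notes on version B (the rewrite author's own statement) =====
-- stated objective: alternative
-- what changed: Instead of folding every word into a grown list-of-clusters (appending to or extending its last cluster), B consumes the sorted list row by row: an inner scan spans one complete row at a time and emits its (top, row) pair immediately, so no nested cluster list or last-cluster access is ever maintained.
import Mathlib
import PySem

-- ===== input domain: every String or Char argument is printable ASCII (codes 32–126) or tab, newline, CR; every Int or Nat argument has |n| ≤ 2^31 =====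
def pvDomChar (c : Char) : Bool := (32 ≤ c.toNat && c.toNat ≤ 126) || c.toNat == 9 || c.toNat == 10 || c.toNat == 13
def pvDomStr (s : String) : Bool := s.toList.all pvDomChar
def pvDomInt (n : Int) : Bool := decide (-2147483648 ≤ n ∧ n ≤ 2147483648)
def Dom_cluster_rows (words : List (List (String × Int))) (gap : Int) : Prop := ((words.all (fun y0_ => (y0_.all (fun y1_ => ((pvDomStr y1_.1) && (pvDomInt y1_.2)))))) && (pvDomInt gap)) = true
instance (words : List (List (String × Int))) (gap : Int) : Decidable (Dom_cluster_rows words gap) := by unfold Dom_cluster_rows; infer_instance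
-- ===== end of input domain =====

-- B changes the decomposition (row-at-a-time span/emit instead of A's fold that grows a
-- list of clusters); equivalence of the RETURN values is proved on inputs where every word
-- has a 'top' key (Pre_); neither program mutates its argument.

-- w['top'] (first match in the association list; Pre_ guarantees the key is present,
-- so the 0 default is never the value used on admitted inputs)
def topOf (w : List (String × Int)) : Int := (PySem.Dict.mk w).getD "top" 0

-- ===== PORT A =====
-- one step of A's for-loop over sw[1:]: extend the last cluster or open a new one
def aStep (gap : Int) (clusters : List (List (List (String × Int)))) (w : List (String × Int)) :
    List (List (List (String × Int))) :=
  if topOf w - topOf ((clusters.getLast?.getD []).getLast?.getD []) ≤ gap then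
    clusters.dropLast ++ [(clusters.getLast?.getD []) ++ [w]]
  else
    clusters ++ [[w]]

def cluster_rows (words : List (List (String × Int))) (gap : Int) : List (Int × (List (List (String × Int)))) :=
  if words.isEmpty then []
  else
    match PySem.List.sorted words topOf false with
    | [] => []   -- unreachable: sorted of a nonempty list is nonempty
    | h :: t =>
      (List.foldl (aStep gap) [[h]] t).map (fun c => (topOf (c.headD []), c))

-- ===== PORT B =====
-- B's inner while loop: grow row while the next word is within gap of row's last word;
-- returns (row, remaining suffix)
def spanB (gap : Int) (row : List (List (String × Int))) (rest : List (List (String × Int))) :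
    List (List (String × Int)) × List (List (String × Int)) :=
  match rest with
  | [] => (row, [])
  | w :: ws =>
    if topOf w - topOf (row.getLast?.getD []) ≤ gap then spanB gap (row ++ [w]) ws
    else (row, w :: ws)

theorem spanB_snd_length (gap : Int) :
    ∀ (rest row : List (List (String × Int))), (spanB gap row rest).2.length ≤ rest.length := by
  intro rest
  induction rest with
  | nil => intro row; simp [spanB]
  | cons w ws ih =>
    intro row
    simp only [spanB]
    split
    · exact le_trans (ih _) (Nat.le_succ _)
    · simp

-- B's outer while loop: emit one (top, row) pair per iteration
def splitRows (gap : Int) : List (List (String × Int)) → List (Int × (List (List (String × Int))))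
  | [] => []
  | h :: t =>
    let p := spanB gap [h] t
    (topOf (p.1.headD []), p.1) :: splitRows gap p.2
termination_by l => l.length
decreasing_by
  exact Nat.lt_succ_of_le (spanB_snd_length gap t [h])

def cluster_rows_alt (words : List (List (String × Int))) (gap : Int) : List (Int × (List (List (String × Int)))) :=
  splitRows gap (PySem.List.sorted words topOf false)

-- ===== PRECONDITION & SPEC =====
-- Pre_ excludes exactly the inputs on which Python A raises KeyError: a word without a 'top' key
def Pre_cluster_rows (words : List (List (String × Int))) (gap : Int) : Prop :=
  ∀ w ∈ words, (PySem.Dict.mk w).contains "top" = true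
instance (words : List (List (String × Int))) (gap : Int) : Decidable (Pre_cluster_rows words gap) := by unfold Pre_cluster_rows; infer_instance

def pvWitness_cluster_rows : (List (List (String × Int))) × Int :=
  ([[("top", 3), ("x0", 10)], [("top", 20)], [("top", 5)]], 6)

def Spec_cluster_rows (words : List (List (String × Int))) (gap : Int) (out : List (Int × (List (List (String × Int))))) : Prop := out = cluster_rows_alt words gap
instance (words : List (List (String × Int))) (gap : Int) (out : List (Int × (List (List (String × Int))))) : Decidable (Spec_cluster_rows words gap out) := by unfold Spec_cluster_rows; infer_instance

-- ===== CLAIM (what is proved, stated in full; the proofs are below) =====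
def Claim_equal_cluster_rows : Prop := ∀ (words : List (List (String × Int))) (gap : Int), Dom_cluster_rows words gap → Pre_cluster_rows words gap → Spec_cluster_rows words gap (cluster_rows words gap)

-- ===== LEMMAS AND PROOFS =====

-- abstract recursive description of the grouping both programs compute
def rowsA (gap : Int) (c : List (List (String × Int))) :
    List (List (String × Int)) → List (List (List (String × Int)))
  | [] => [c]
  | w :: ws =>
    if topOf w - topOf (c.getLast?.getD []) ≤ gap then rowsA gap (c ++ [w]) ws
    else c :: rowsA gap [w] ws

-- A's fold equals rowsA, for any prefix of already-closed clusters
theorem foldl_aStep_eq (gap : Int) :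
    ∀ (ws : List (List (String × Int))) (init : List (List (List (String × Int))))
      (c : List (List (String × Int))),
      List.foldl (aStep gap) (init ++ [c]) ws = init ++ rowsA gap c ws := by
  intro ws
  induction ws with
  | nil => intro init c; simp [rowsA]
  | cons w ws ih =>
    intro init c
    simp only [List.foldl_cons, aStep, rowsA, List.getLast?_concat, Option.getD_some,
      List.dropLast_concat]
    split
    · exact ih init (c ++ [w])
    · rw [show (init ++ [c]) ++ [[w]] = (init ++ [c]) ++ [[w]] from rfl, ih (init ++ [c]) [w]]
      simp

-- rowsA decomposes into one span plus the rows of the remainder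
theorem rowsA_span (gap : Int) :
    ∀ (ws c : List (List (String × Int))),
      rowsA gap c ws = (spanB gap c ws).1 ::
        (match (spanB gap c ws).2 with
         | [] => []
         | h :: t => rowsA gap [h] t) := by
  intro ws
  induction ws with
  | nil => intro c; simp [rowsA, spanB]
  | cons w ws ih =>
    intro c
    simp only [rowsA, spanB]
    split
    · exact ih (c ++ [w])
    · rfl

-- mapping A's projection over rowsA is exactly B's splitRows
theorem map_rowsA_eq_splitRows (gap : Int) :
    ∀ (n : ℕ) (h : List (String × Int)) (t : List (List (String × Int))), (h :: t).length ≤ n →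
      (rowsA gap [h] t).map (fun c => (topOf (c.headD []), c)) = splitRows gap (h :: t) := by
  intro n
  induction n with
  | zero => intro h t hlen; simp at hlen
  | succ n ih =>
    intro h t hlen
    rw [rowsA_span gap t [h]]
    simp only [List.map_cons, splitRows]
    congr 1
    have hrest : (spanB gap [h] t).2.length ≤ n := by
      have := spanB_snd_length gap t [h]
      simp only [List.length_cons] at hlen
      omega
    match hp : (spanB gap [h] t).2 with
    | [] => simp [splitRows]
    | h' :: t' =>
      rw [hp] at hrest
      exact ih h' t' hrest

-- ===== VERDICT (by name: the statement is the Claim_ definition above) =====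
theorem cluster_rows_spec : Claim_equal_cluster_rows := by
  intro words gap _ _
  unfold Spec_cluster_rows cluster_rows cluster_rows_alt
  by_cases hw : words.isEmpty
  · have : words = [] := List.isEmpty_iff.mp hw
    subst this
    simp [splitRows, PySem.List.sorted]
  · simp only [hw, Bool.false_eq_true, if_false]
    match hs : PySem.List.sorted words topOf false with
    | [] =>
      show ([] : List (Int × (List (List (String × Int))))) = splitRows gap []
      simp [splitRows]
    | h :: t =>
      show (List.foldl (aStep gap) [[h]] t).map (fun c => (topOf (c.headD []), c))
            = splitRows gap (h :: t)
      rw [show List.foldl (aStep gap) [[h]] t = [] ++ rowsA gap [h] t from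
        foldl_aStep_eq gap t [] [h]]
      simp only [List.nil_append]
      exact map_rowsA_eq_splitRows gap (t.length + 1) h t (by simp)
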